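-- pv_equiv track=rewrite | github.com/Jaeyeop-Jung/CodingTest | 프로그래머스/Lv4/1회차/Lv4. 올바른 괄호의 갯수.py | solution
-- ===== SOURCE A (Python) =====
-- def solution(n):
--     if n == 1:
--         return 1
--     elif n == 2:
--         return 2
--     elif n == 3:
--         return 5
--     dp = [0] * (n + 1)
--     dp[1] = 1
--     dp[2] = 2
--     dp[3] = 5
--     for i in range(4, n + 1):
--         dp[i] = sum(dp) - i
--     return dp[-1]
-- ===== SOURCE B (Python) =====
-- def solution(n):
--     if n == 1:
--         return 1
--     if n == 2:
--         return 2
--     if n == 3: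
--         return 5
--     return 3 * 2 ** (n - 4) + 1
-- ===== Notes on version B (the rewrite author's own statement) =====
-- stated objective: faster
-- what changed: Replaced the quadratic dp loop that re-sums the whole array each iteration by the closed form 3*2^(n-4)+1 (the recurrence dp[i]=sum(dp)-i doubles the running sum, giving a geometric sequence).
import Mathlib
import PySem

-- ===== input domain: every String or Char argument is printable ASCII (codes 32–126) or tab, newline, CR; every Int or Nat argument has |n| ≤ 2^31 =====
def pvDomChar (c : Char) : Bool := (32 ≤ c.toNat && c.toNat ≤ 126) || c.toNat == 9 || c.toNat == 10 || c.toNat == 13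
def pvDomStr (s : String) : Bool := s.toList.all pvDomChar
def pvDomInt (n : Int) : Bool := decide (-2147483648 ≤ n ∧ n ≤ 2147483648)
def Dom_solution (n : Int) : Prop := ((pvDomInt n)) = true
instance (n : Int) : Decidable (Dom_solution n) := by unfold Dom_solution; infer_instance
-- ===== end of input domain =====

-- B replaces A's quadratic dp loop (re-summing the whole array each step) by the
-- closed form 3·2^(n-4)+1, which the recurrence dp[i] = sum(dp) - i satisfies.

-- ===== PORT A =====
def solution (n : Int) : Int :=
  if n == 1 then 1
  else if n == 2 then 2
  else if n == 3 then 5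
  else
    let dp := List.replicate (n + 1).toNat (0 : Int)
    let dp := dp.set 1 1
    let dp := dp.set 2 2
    let dp := dp.set 3 5
    let dp := (PySem.List.pyRange 4 (n + 1) 1).foldl
      (fun dp i => dp.set i.toNat (dp.sum - i)) dp
    (PySem.List.pyGet? dp (-1)).getD 0

-- ===== PORT B =====
def solution_alt (n : Int) : Int :=
  if n == 1 then 1
  else if n == 2 then 2
  else if n == 3 then 5
  else 3 * 2 ^ (n - 4).toNat + 1

-- ===== PRECONDITION & SPEC =====
-- Pre_ excludes n ≤ 0, where Python A raises IndexError on 'dp[1] = 1' (or builds dp = []).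
def Pre_solution (n : Int) : Prop := 1 ≤ n
instance (n : Int) : Decidable (Pre_solution n) := by unfold Pre_solution; infer_instance
def pvWitness_solution : Int := 6

def Spec_solution (n : Int) (out : Int) : Prop := out = solution_alt n
instance (n : Int) (out : Int) : Decidable (Spec_solution n out) := by unfold Spec_solution; infer_instance

-- ===== CLAIM (what is proved, stated in full; the proofs are below) =====
def Claim_equal_solution : Prop := ∀ (n : Int), Dom_solution n → Pre_solution n → Spec_solution n (solution n)

-- ===== LEMMAS AND PROOFS =====

-- sum after overwriting an entry that is currently 0
lemma sum_set_zero (xs : List Int) (i : Nat) (a : Int) (h : i < xs.length)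
    (h0 : xs[i]? = some (0 : Int)) : (xs.set i a).sum = xs.sum + a := by
  have hx : xs[i] = (0 : Int) := by
    have := List.getElem?_eq_getElem h
    rw [this] at h0; exact (Option.some_injective _ h0)
  have ht := List.sum_take_add_sum_drop xs i
  simp [List.sum_set, h, List.sum_drop_succ, hx]
  omega

-- the initial array [0,1,2,5,0,…,0]
def dp0 (n : Int) : List Int :=
  (((List.replicate (n + 1).toNat (0 : Int)).set 1 1).set 2 2).set 3 5

def loopStep : List Int → Int → List Int := fun dp i => dp.set i.toNat (dp.sum - i)

lemma dp0_length (n : Int) : (dp0 n).length = (n + 1).toNat := by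
  simp [dp0]

lemma dp0_sum (n : Int) (hn : 4 ≤ n) : (dp0 n).sum = 8 := by
  have h1 : (1 : Nat) < (n + 1).toNat := by omega
  have h2 : (2 : Nat) < (n + 1).toNat := by omega
  have h3 : (3 : Nat) < (n + 1).toNat := by omega
  unfold dp0
  rw [sum_set_zero _ 3 5 (by simp; omega)
      (by rw [List.getElem?_set_ne (by omega), List.getElem?_set_ne (by omega)]
          simp [h3]),
    sum_set_zero _ 2 2 (by simp; omega)
      (by rw [List.getElem?_set_ne (by omega)]
          simp [h2]),
    sum_set_zero _ 1 1 (by simp; omega)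
      (by simp [h1])]
  simp [List.sum_replicate]

lemma dp0_tail (n : Int) (j : Nat) (h3 : 3 < j) (hj : j < (n + 1).toNat) :
    (dp0 n)[j]? = some (0 : Int) := by
  unfold dp0
  rw [List.getElem?_set_ne (by omega), List.getElem?_set_ne (by omega),
    List.getElem?_set_ne (by omega)]
  simp [hj]

-- invariant after running the loop for the range 4 .. 4+k (k steps), with 3+k ≤ n
lemma loop_inv (n : Int) (hn : 4 ≤ n) :
    ∀ (k : Nat), (3 + (k : Int)) ≤ n →
      ((PySem.List.pyRange 4 (4 + (k : Int)) 1).foldl loopStep (dp0 n)).length = (n + 1).toNat ∧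
      ((PySem.List.pyRange 4 (4 + (k : Int)) 1).foldl loopStep (dp0 n)).sum
        = 3 * 2 ^ k + (3 + (k : Int)) + 2 ∧
      (∀ (j : Nat), 3 + (k : Int) < (j : Int) → (j : Int) ≤ n →
        ((PySem.List.pyRange 4 (4 + (k : Int)) 1).foldl loopStep (dp0 n))[j]? = some (0 : Int)) := by
  intro k
  induction k with
  | zero =>
    intro _
    rw [show ((4 : Int) + ((0 : Nat) : Int)) = 4 by norm_num,
      PySem.List.pyRange_one_eq_nil (by omega)]
    refine ⟨dp0_length n, by simp only [List.foldl_nil]; rw [dp0_sum n hn]; norm_num, ?_⟩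
    intro j hj1 hj2
    exact dp0_tail n j (by exact_mod_cast (by omega : (3:Int) < (j:Int))) (by omega)
  | succ k ih =>
    intro hk
    have hk' : (3 + (k : Int)) ≤ n := by push_cast at hk ⊢; omega
    obtain ⟨hl, hs, hz⟩ := ih hk'
    have hsplit : PySem.List.pyRange 4 (4 + ((k + 1 : Nat) : Int)) 1
        = PySem.List.pyRange 4 (4 + (k : Int)) 1 ++ [4 + (k : Int)] := by
      have := PySem.List.pyRange_one_succ_right (show (4:Int) ≤ 4 + (k : Int) by omega)
      push_cast
      rw [show (4 : Int) + ((k : Int) + 1) = (4 + (k : Int)) + 1 by ring]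
      exact this
    set dp := (PySem.List.pyRange 4 (4 + (k : Int)) 1).foldl loopStep (dp0 n) with hdp
    have hidx : (4 + (k : Int)).toNat < dp.length := by rw [hl]; omega
    have hidxv : ((4 + (k : Int)).toNat : Int) = 4 + (k : Int) := by omega
    have hcur : dp[(4 + (k : Int)).toNat]? = some (0 : Int) := by
      apply hz
      · rw [hidxv]; omega
      · rw [hidxv]; push_cast at hk; omega
    rw [hsplit, List.foldl_append]
    simp only [List.foldl_cons, List.foldl_nil, loopStep]
    refine ⟨by simpa using hl, ?_, ?_⟩
    · rw [sum_set_zero dp _ _ hidx hcur, hs]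
      push_cast; ring
    · intro j hj1 hj2
      rw [List.getElem?_set_ne, hz j (by push_cast at hj1 ⊢; omega) hj2]
      have : ((j : Int)) ≠ 4 + (k : Int) := by push_cast at hj1; omega
      omega

lemma solution_closed (n : Int) (hn : 4 ≤ n) :
    solution n = 3 * 2 ^ (n - 4).toNat + 1 := by
  unfold solution
  rw [if_neg (by simp; omega), if_neg (by simp; omega), if_neg (by simp; omega)]
  show (PySem.List.pyGet? ((PySem.List.pyRange 4 (n + 1) 1).foldl loopStep (dp0 n)) (-1)).getD 0
      = 3 * 2 ^ (n - 4).toNat + 1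
  have hk : (3 + ((n - 4).toNat : Int)) ≤ n - 1 ∧ (4 + ((n - 4).toNat : Int)) = n := by omega
  obtain ⟨hl, hs, hz⟩ := loop_inv n hn (n - 4).toNat (by omega)
  rw [hk.2] at hl hs hz
  have hsplit : PySem.List.pyRange 4 (n + 1) 1 = PySem.List.pyRange 4 n 1 ++ [n] :=
    PySem.List.pyRange_one_succ_right (show (4:Int) ≤ n by omega)
  rw [hsplit, List.foldl_append]
  simp only [List.foldl_cons, List.foldl_nil, loopStep]
  set dp := (PySem.List.pyRange 4 n 1).foldl loopStep (dp0 n) with hdp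
  have hidx : n.toNat < dp.length := by rw [hl]; omega
  have hlast : (dp.set n.toNat (dp.sum - n)).length - 1 = n.toNat := by
    rw [List.length_set, hl]; omega
  rw [PySem.List.pyGet?_neg_one, List.getLast?_eq_getElem?, hlast,
    List.getElem?_set_self hidx]
  rw [hs]
  have h2 : (n - 4).toNat = ((n - 4).toNat - 1) + 1 ∨ n = 4 := by omega
  rcases h2 with h2 | h2
  · simp only [Option.getD_some]
    set m := (n - 4).toNat - 1 with hm
    have : 3 * (2 : Int) ^ (n - 4).toNat = 2 * (3 * 2 ^ m) := by
      rw [h2]; ring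
    rw [show m = (n - 1 - 4).toNat by omega] at this
    omega
  · subst h2; norm_num

-- ===== VERDICT (by name: the statement is the Claim_ definition above) =====
theorem solution_spec : Claim_equal_solution := by
  intro n _ hpre
  unfold Spec_solution solution_alt
  by_cases h1 : n = 1
  · subst h1; decide
  · by_cases h2 : n = 2
    · subst h2; decide
    · by_cases h3 : n = 3
      · subst h3; decide
      · have hn : 4 ≤ n := by unfold Pre_solution at hpre; omega
        rw [solution_closed n hn]
        rw [if_neg (by simp [h1]), if_neg (by simp [h2]), if_neg (by simp [h3])]
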